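-- pv_equiv track=rewrite | github.com/oscaruiz/f1spainbot | services/calendargp.py | get_schedule_response
-- ===== SOURCE A (Python) =====
-- def get_schedule_response(schedule):
--     '''Introduce jump of line in the schedule so it's more displayable by the bot.
--     '''
--     response=""
--     caps=position_caps(schedule) # Where we found a Cap letter we have to insert a \N
--
--     # TO DO - Improve this code
--     i=0
--     for cap in caps:
--         if(i<len(caps)-1):
--             response+=schedule[caps[i]:caps[i+1]]
--             response+="\n"
--             i+=1
--
--     return response
--
-- def position_caps(str):
--     '''Returns a list the position of the capital letter of the given string.
--     '''
--     stcounter=0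
--     numCaps=0
--     positioncaplist = list()
--
--     for i in str:
--         if i.isupper():
--             numCaps+=1
--             positioncaplist.append(stcounter)
--
--         stcounter+=1
--
--     return positioncaplist
-- ===== SOURCE B (Python) =====
-- def get_schedule_response(schedule):
--     '''Introduce jump of line in the schedule so it's more displayable by the bot.
--     Single scan: buffer the current segment from the last capital letter; on each
--     new capital, emit the buffered segment plus a newline. The trailing segment is
--     never emitted, matching the original's output.
--     '''
--     response = ""
--     current = None
--     for ch in schedule:
--         if ch.isupper():
--             if current is not None:
--                 response += current + "\n"
--             current = ch
--         elif current is not None: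
--             current += ch
--     return response
-- ===== Notes on version B (the rewrite author's own statement) =====
-- stated objective: simpler
-- what changed: Replaced the two-pass index-list-plus-slicing scheme (collect capital positions, then re-scan with indexed slices) by one direct scan that buffers the segment since the last capital and emits it with a newline when the next capital arrives.
import Mathlib
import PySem

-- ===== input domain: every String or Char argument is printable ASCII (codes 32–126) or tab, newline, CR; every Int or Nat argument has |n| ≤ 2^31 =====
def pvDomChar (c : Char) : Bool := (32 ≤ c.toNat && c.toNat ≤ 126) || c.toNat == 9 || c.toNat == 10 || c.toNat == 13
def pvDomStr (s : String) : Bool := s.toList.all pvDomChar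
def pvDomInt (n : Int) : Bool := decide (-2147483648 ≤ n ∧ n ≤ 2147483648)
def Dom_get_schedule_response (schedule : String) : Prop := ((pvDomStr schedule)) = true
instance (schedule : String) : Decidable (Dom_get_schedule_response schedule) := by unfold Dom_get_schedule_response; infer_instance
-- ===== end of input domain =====

-- B replaces A's two-pass index-list-and-slice scheme by one buffered scan (objective: simpler); same output, including the dropped trailing segment.

-- ===== PORT A =====
-- position_caps: counter fold collecting uppercase positions (numCaps kept to mirror the source).
def pvPositionCaps (s : List Char) : List Int :=
  (s.foldl
    (fun (st : Int × Int × List Int) c =>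
      if PySem.Chars.isupper c then (st.1 + 1, st.2.1 + 1, st.2.2 ++ [st.1])
      else (st.1 + 1, st.2.1, st.2.2))
    (0, 0, [])).2.2

def get_schedule_response (schedule : String) : String :=
  let s := schedule.toList
  let caps := pvPositionCaps s
  let fin := caps.foldl
    (fun (st : List Char × Int) _cap =>
      if st.2 < (caps.length : Int) - 1 then
        (st.1 ++ PySem.List.slice s (some (PySem.List.pyGetD caps st.2 0)) (some (PySem.List.pyGetD caps (st.2 + 1) 0)) ++ ['\n'], st.2 + 1)
      else st)
    ([], 0)
  String.ofList fin.1

-- ===== PORT B =====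
def pvStepB (st : List Char × Option (List Char)) (c : Char) : List Char × Option (List Char) :=
  if PySem.Chars.isupper c then
    ((match st.2 with
      | some cur => st.1 ++ cur ++ ['\n']
      | none => st.1), some [c])
  else
    match st.2 with
    | some cur => (st.1, some (cur ++ [c]))
    | none => st

def get_schedule_response_alt (schedule : String) : String :=
  String.ofList (schedule.toList.foldl pvStepB ([], none)).1

-- ===== PRECONDITION & SPEC =====
def Spec_get_schedule_response (schedule : String) (out : String) : Prop := out = get_schedule_response_alt schedule
instance (schedule : String) (out : String) : Decidable (Spec_get_schedule_response schedule out) := by unfold Spec_get_schedule_response; infer_instance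

-- ===== CLAIM (what is proved, stated in full; the proofs are below) =====
def Claim_equal_get_schedule_response : Prop := ∀ (schedule : String), Dom_get_schedule_response schedule → Spec_get_schedule_response schedule (get_schedule_response schedule)

-- ===== LEMMAS AND PROOFS =====

-- positions (as Nats) of uppercase characters, starting at offset `off`
def pvCapsF (off : Nat) : List Char → List Nat
  | [] => []
  | c :: t => (if PySem.Chars.isupper c then [off] else []) ++ pvCapsF (off + 1) t

def pvSliceN (l : List Char) (p q : Nat) : List Char := (l.drop p).take (q - p)

-- the segments between consecutive capital positions, each followed by '\n'
def pvPairSegs (l : List Char) : List Nat → List Char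
  | p :: q :: rest => pvSliceN l p q ++ '\n' :: pvPairSegs l (q :: rest)
  | _ => []

theorem pvCapsF_append (off : Nat) (l1 l2 : List Char) :
    pvCapsF off (l1 ++ l2) = pvCapsF off l1 ++ pvCapsF (off + l1.length) l2 := by
  induction l1 generalizing off with
  | nil => simp [pvCapsF]
  | cons c t ih => simp [pvCapsF, ih (off + 1)]; ring_nf

theorem pvMem_capsF {p off : Nat} {l : List Char} (h : p ∈ pvCapsF off l) :
    off ≤ p ∧ p < off + l.length := by
  induction l generalizing off with
  | nil => simp [pvCapsF] at h
  | cons c t ih =>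
    simp [pvCapsF] at h
    rcases h with h | h
    · rcases h with ⟨-, rfl⟩; simp
    · have := ih h; simp only [List.length_cons]; omega

theorem pvPositionCaps_loop (t : List Char) (off : Nat) (m : Int) (acc : List Int) :
    (t.foldl
      (fun (st : Int × Int × List Int) c =>
        if PySem.Chars.isupper c then (st.1 + 1, st.2.1 + 1, st.2.2 ++ [st.1])
        else (st.1 + 1, st.2.1, st.2.2))
      ((off : Int), m, acc)).2.2 = acc ++ (pvCapsF off t).map (Nat.cast : Nat → Int) := by
  induction t generalizing off m acc with
  | nil => simp [pvCapsF]
  | cons c t ih =>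
    have hcast : ((off : Int) + 1) = ((off + 1 : Nat) : Int) := by push_cast; ring
    by_cases h : PySem.Chars.isupper c
    · simp only [List.foldl_cons, if_pos h, hcast, ih, pvCapsF]
      simp
    · simp only [List.foldl_cons, if_neg h, hcast, ih, pvCapsF]
      simp

theorem pvPositionCaps_eq (s : List Char) :
    pvPositionCaps s = (pvCapsF 0 s).map (Nat.cast : Nat → Int) := by
  have := pvPositionCaps_loop s 0 0 []
  simpa [pvPositionCaps] using this

theorem pvPairSegs_small (l : List Char) {caps : List Nat} (h : caps.length ≤ 1) :
    pvPairSegs l caps = [] := by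
  match caps with
  | [] => rfl
  | [p] => rfl
  | p :: q :: r => simp at h

theorem pvPairSegs_append (l : List Char) (caps : List Nat) (n : Nat) :
    pvPairSegs l (caps ++ [n]) =
      pvPairSegs l caps ++
        (match caps.getLast? with
         | some p => pvSliceN l p n ++ ['\n']
         | none => []) := by
  induction caps with
  | nil => simp [pvPairSegs]
  | cons p rest ih =>
    cases rest with
    | nil => simp [pvPairSegs]
    | cons q rest' =>
      simp only [List.cons_append] at ih
      simp only [List.cons_append, pvPairSegs, ih, List.getLast?_cons_cons]
      simp

theorem pvSliceN_append_le {p q : Nat} {l : List Char} (c : Char)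
    (hp : p ≤ l.length) (hq : q ≤ l.length) :
    pvSliceN (l ++ [c]) p q = pvSliceN l p q := by
  unfold pvSliceN
  rw [List.drop_append_of_le_length hp]
  rw [List.take_append_of_le_length (by simp; omega)]

theorem pvSliceN_last {p : Nat} {l : List Char} (c : Char) (hp : p ≤ l.length) :
    pvSliceN (l ++ [c]) p l.length = l.drop p := by
  unfold pvSliceN
  rw [List.drop_append_of_le_length hp]
  have h : l.length - p = (l.drop p).length := by simp
  rw [h, List.take_left]

theorem pvPairSegs_extend (l : List Char) (c : Char) :
    ∀ (caps : List Nat), (∀ x ∈ caps, x ≤ l.length) →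
      pvPairSegs (l ++ [c]) caps = pvPairSegs l caps := by
  intro caps
  induction caps with
  | nil => intro _; rfl
  | cons p rest ih =>
    intro h
    cases rest with
    | nil => rfl
    | cons q rest' =>
      simp only [pvPairSegs]
      rw [pvSliceN_append_le c (h p (by simp)) (h q (by simp)),
        ih (fun x hx => h x (by simp [hx]))]

theorem pvB_inv (l : List Char) :
    l.foldl pvStepB ([], none) =
      (pvPairSegs l (pvCapsF 0 l), ((pvCapsF 0 l).getLast?).map (fun p => l.drop p)) := by
  induction l using List.reverseRecOn with
  | nil => simp [pvCapsF, pvPairSegs]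
  | append_singleton l c ih =>
    rw [List.foldl_append, ih]
    have hmem : ∀ x ∈ pvCapsF 0 l, x ≤ l.length := by
      intro x hx; have := pvMem_capsF hx; omega
    simp only [List.foldl_cons, List.foldl_nil]
    by_cases hu : PySem.Chars.isupper c
    · have hcaps : pvCapsF 0 (l ++ [c]) = pvCapsF 0 l ++ [l.length] := by
        rw [pvCapsF_append]; simp [pvCapsF, hu]
      rw [hcaps, pvPairSegs_append, pvPairSegs_extend l c _ hmem]
      cases hlast : (pvCapsF 0 l).getLast? with
      | none => simp [pvStepB, hu, hlast]
      | some p =>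
        have hp : p ≤ l.length := hmem p (List.mem_of_getLast? hlast)
        simp [pvStepB, hu, hlast, pvSliceN_last c hp]
    · have hb : PySem.Chars.isupper c = false := by simpa using hu
      have hcaps : pvCapsF 0 (l ++ [c]) = pvCapsF 0 l := by
        rw [pvCapsF_append]; simp [pvCapsF, hb]
      rw [hcaps, pvPairSegs_extend l c _ hmem]
      cases hlast : (pvCapsF 0 l).getLast? with
      | none => simp [pvStepB, hb]
      | some p =>
        have hp : p ≤ l.length := hmem p (List.mem_of_getLast? hlast)
        simp [pvStepB, hb, List.drop_append_of_le_length hp]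

theorem pvLoopA (l : List Char) (capsN : List Nat) (caps : List Int)
    (hc : caps = capsN.map (Nat.cast : Nat → Int)) :
    ∀ (todo : List Int) (r : List Char) (i : Nat), capsN.length ≤ i + todo.length + 1 →
      (todo.foldl
        (fun (st : List Char × Int) _cap =>
          if st.2 < (caps.length : Int) - 1 then
            (st.1 ++ PySem.List.slice l (some (PySem.List.pyGetD caps st.2 0)) (some (PySem.List.pyGetD caps (st.2 + 1) 0)) ++ ['\n'], st.2 + 1)
          else st)
        (r, (i : Int))).1 = r ++ pvPairSegs l (capsN.drop i) := by
  subst hc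
  intro todo
  induction todo with
  | nil =>
    intro r i hlen
    simp only [List.length_nil, Nat.add_zero] at hlen
    simp only [List.foldl_nil]
    rw [pvPairSegs_small l (by simp only [List.length_drop]; omega)]
    simp
  | cons x todo ih =>
    intro r i hlen
    simp only [List.length_cons] at hlen
    simp only [List.foldl_cons]
    have hklen : (capsN.map (Nat.cast : Nat → Int)).length = capsN.length := by simp
    by_cases hi : (i : Int) < ((capsN.map (Nat.cast : Nat → Int)).length : Int) - 1
    · have h2 := hi
      rw [hklen] at h2
      have hi2 : i < capsN.length := by omega
      have hn : i + 1 < capsN.length := by omega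
      rw [if_pos hi]
      have e1 : PySem.List.pyGetD (capsN.map (Nat.cast : Nat → Int)) (i : Int) 0
          = ((capsN.getD i 0 : Nat) : Int) := by
        simp only [PySem.List.pyGetD_natCast, List.getD_eq_getElem?_getD, List.getElem?_map]
        cases h3 : capsN[i]? <;> simp
      have e2 : PySem.List.pyGetD (capsN.map (Nat.cast : Nat → Int)) ((i : Int) + 1) 0
          = ((capsN.getD (i + 1) 0 : Nat) : Int) := by
        rw [show ((i : Int) + 1) = ((i + 1 : Nat) : Int) by push_cast; ring]
        simp only [PySem.List.pyGetD_natCast, List.getD_eq_getElem?_getD, List.getElem?_map]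
        cases h3 : capsN[i+1]? <;> simp
      rw [e1, e2, PySem.List.slice_natCast,
        show ((i : Int) + 1) = ((i + 1 : Nat) : Int) by push_cast; ring,
        ih _ (i + 1) (by omega)]
      have d2 : capsN.drop (i + 1) = capsN.getD (i + 1) 0 :: capsN.drop (i + 2) := by
        rw [List.drop_eq_getElem_cons hn, List.getD_eq_getElem _ _ hn]
      have d1 : capsN.drop i = capsN.getD i 0 :: capsN.drop (i + 1) := by
        rw [List.drop_eq_getElem_cons hi2, List.getD_eq_getElem _ _ hi2]
      rw [d1, d2, pvPairSegs, ← d2]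
      simp [pvSliceN]
    · rw [if_neg hi]
      rw [hklen] at hi
      rw [ih r i (by omega)]

-- ===== VERDICT (by name: the statement is the Claim_ definition above) =====
theorem get_schedule_response_spec : Claim_equal_get_schedule_response := by
  intro schedule _
  unfold Spec_get_schedule_response
  simp only [get_schedule_response, get_schedule_response_alt]
  rw [pvB_inv]
  rw [pvPositionCaps_eq schedule.toList]
  have hlen : (pvCapsF 0 schedule.toList).length ≤
      0 + ((pvCapsF 0 schedule.toList).map (Nat.cast : Nat → Int)).length + 1 := by simp
  have h := pvLoopA schedule.toList (pvCapsF 0 schedule.toList) _ rfl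
    ((pvCapsF 0 schedule.toList).map (Nat.cast : Nat → Int)) [] 0 hlen
  simp only [Nat.cast_zero, List.drop_zero, List.nil_append] at h
  rw [h]
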